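-- pv_equiv track=rewrite | github.com/RobertBeze/Summer-Practice-Facebook-Bot | facebook_funcs.py | get_date_and_time
-- ===== SOURCE A (Python) =====
-- def get_date_and_time(d):
--     data = str()
--     c1 = 0
--     c2 = 0
--     for x in d:
--         if x == 'T':
--             break
--         data += x
--         c1 += 1
--     data += '; time: '
--     for x in d:
--         c2 += 1
--         if c2 <= c1:
--             continue
--         elif x != '+':
--             data += x
--     return data
-- ===== SOURCE B (Python) =====
-- def get_date_and_time(d):
--     i = d.find('T')
--     if i == -1:
--         i = len(d)
--     return d[:i] + '; time: ' + d[i:].replace('+', '')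
-- ===== Notes on version B (the rewrite author's own statement) =====
-- stated objective: idiomatic
-- what changed: Replaces the two counter-driven character loops with a single find('T'), two slices and str.replace to strip '+' from the tail.
import Mathlib
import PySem

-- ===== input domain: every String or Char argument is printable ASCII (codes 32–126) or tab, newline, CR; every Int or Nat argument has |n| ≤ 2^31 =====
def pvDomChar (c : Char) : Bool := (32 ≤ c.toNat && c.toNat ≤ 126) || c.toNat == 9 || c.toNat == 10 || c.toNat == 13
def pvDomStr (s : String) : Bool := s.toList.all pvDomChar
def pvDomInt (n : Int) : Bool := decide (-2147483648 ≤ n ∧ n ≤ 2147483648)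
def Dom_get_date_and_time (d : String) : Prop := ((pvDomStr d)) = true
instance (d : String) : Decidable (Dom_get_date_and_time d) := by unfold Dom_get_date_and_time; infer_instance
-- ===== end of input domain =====

-- B replaces A's two counter-driven character loops by find('T'), two slices and str.replace (idiomatic; return value only).

-- ===== PORT A =====
-- first loop: copy chars into data until a 'T', counting them in c1
def gdtLoop1 : List Char → List Char → Nat → (List Char × Nat)
  | [], data, c1 => (data, c1)
  | x :: rest, data, c1 =>
    if x = 'T' then (data, c1) else gdtLoop1 rest (data ++ [x]) (c1 + 1)

-- second loop: count every char in c2, skip while c2 ≤ c1, append the rest unless '+'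
def gdtLoop2 : List Char → List Char → Nat → Nat → List Char
  | [], data, _, _ => data
  | x :: rest, data, c2, c1 =>
    let c2' := c2 + 1
    if c2' ≤ c1 then gdtLoop2 rest data c2' c1
    else if x ≠ '+' then gdtLoop2 rest (data ++ [x]) c2' c1
    else gdtLoop2 rest data c2' c1

def get_date_and_time (d : String) : String :=
  let p := gdtLoop1 d.toList [] 0
  let data := p.1 ++ "; time: ".toList
  String.ofList (gdtLoop2 d.toList data 0 p.2)

-- ===== PORT B =====
def get_date_and_time_alt (d : String) : String :=
  let i0 := PySem.Str.find d "T"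
  let i : Int := if i0 = -1 then PySem.Str.len d else i0
  PySem.Str.slice d none (some i) ++ "; time: " ++
    PySem.Str.replace (PySem.Str.slice d (some i) none) "+" ""

-- ===== PRECONDITION & SPEC =====
def Spec_get_date_and_time (d : String) (out : String) : Prop := out = get_date_and_time_alt d
instance (d : String) (out : String) : Decidable (Spec_get_date_and_time d out) := by unfold Spec_get_date_and_time; infer_instance

-- ===== CLAIM (what is proved, stated in full; the proofs are below) =====
def Claim_equal_get_date_and_time : Prop := ∀ (d : String), Dom_get_date_and_time d → Spec_get_date_and_time d (get_date_and_time d)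

-- ===== LEMMAS AND PROOFS =====

theorem gdtLoop1_spec (l : List Char) (data : List Char) (c : Nat) :
    gdtLoop1 l data c =
      (data ++ l.takeWhile (· ≠ 'T'), c + (l.takeWhile (· ≠ 'T')).length) := by
  induction l generalizing data c with
  | nil => simp [gdtLoop1]
  | cons x rest ih =>
    by_cases hx : x = 'T'
    · simp [gdtLoop1, hx, List.takeWhile]
    · simp [gdtLoop1, hx, List.takeWhile, ih]
      omega

theorem gdtLoop2_spec (l : List Char) (data : List Char) (c2 c1 : Nat) :
    gdtLoop2 l data c2 c1 = data ++ (l.drop (c1 - c2)).filter (· ≠ '+') := by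
  induction l generalizing data c2 with
  | nil => simp [gdtLoop2]
  | cons x rest ih =>
    by_cases h : c2 + 1 ≤ c1
    · have hd : (x :: rest).drop (c1 - c2) = rest.drop (c1 - (c2 + 1)) := by
        have : c1 - c2 = (c1 - (c2 + 1)) + 1 := by omega
        simp [this]
      simp [gdtLoop2, h, ih, hd]
    · have hd : c1 - c2 = 0 := by omega
      have hd2 : c1 - (c2 + 1) = 0 := by omega
      by_cases hx : x = '+'
      · simp [gdtLoop2, h, hx, ih, hd, hd2]
      · simp [gdtLoop2, h, hx, ih, hd, hd2]

-- Chars.replace with old = "+" and new = "" is exactly filtering out '+'.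
theorem replace_go_plus (fuel : Nat) (l acc : List Char) (hf : l.length ≤ fuel) :
    PySem.Chars.replace.go ['+'] [] fuel l acc =
      acc.reverse ++ l.filter (· ≠ '+') := by
  induction fuel generalizing l acc with
  | zero =>
    have : l = [] := by
      cases l with
      | nil => rfl
      | cons a t => simp at hf
    simp [this, PySem.Chars.replace.go]
  | succ n ih =>
    cases l with
    | nil => simp [PySem.Chars.replace.go]
    | cons a t =>
      by_cases ha : a = '+'
      · have hp : List.isPrefixOf ['+'] (a :: t) = true := by
          simp [List.isPrefixOf, ha]
        rw [PySem.Chars.replace.go, if_pos hp]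
        simp only [List.length_cons] at hf
        simpa [ha] using ih t acc (by omega)
      · have hp : List.isPrefixOf ['+'] (a :: t) = false := by
          simp only [List.isPrefixOf, Bool.and_true]
          exact decide_eq_false (fun h => ha (Eq.symm h))
        rw [PySem.Chars.replace.go, if_neg (by simp [hp])]
        simp only [List.length_cons] at hf
        simpa [ha] using ih t (a :: acc) (by omega)

theorem replace_plus (l : List Char) :
    PySem.Chars.replace l ['+'] [] = l.filter (· ≠ '+') := by
  rw [PySem.Chars.replace]
  simp [replace_go_plus l.length l [] (le_refl _)]

theorem takeWhile_eq_take_of_getElem {l : List Char} {j : Nat} (hj : j < l.length)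
    (hT : l[j] = 'T') (hlt : ∀ i, (hi : i < j) → l[i]'(by omega) ≠ 'T') :
    l.takeWhile (· ≠ 'T') = l.take j := by
  induction l generalizing j with
  | nil => simp at hj
  | cons a t ih =>
    cases j with
    | zero => simp_all [List.takeWhile]
    | succ m =>
      have ha : a ≠ 'T' := by
        have := hlt 0 (by omega); simpa using this
      simp only [List.length_cons] at hj
      have ht : t[m] = 'T' := by simpa using hT
      have hlt' : ∀ i, (hi : i < m) → t[i]'(by omega) ≠ 'T' := by
        intro i hi
        have := hlt (i + 1) (by omega)
        simpa using this
      rw [List.takeWhile_cons, if_pos (by simp [ha]), List.take_succ_cons,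
        ih (by omega) ht hlt']

theorem takeWhile_eq_self_of_not_mem {l : List Char} (h : 'T' ∉ l) :
    l.takeWhile (· ≠ 'T') = l := by
  apply List.takeWhile_eq_self_iff.mpr
  intro x hx
  simp only [decide_eq_true_eq]
  intro hxe; exact h (hxe ▸ hx)

theorem get_date_and_time_eq (d : String) :
    get_date_and_time d = get_date_and_time_alt d := by
  apply String.toList_injective
  rcases lt_or_ge (PySem.Chars.find d.toList ['T']) 0 with hneg | hpos
  · -- no 'T' in d
    have hm1 : PySem.Chars.find d.toList ['T'] = -1 := by
      have := PySem.Chars.neg_one_le_find d.toList ['T']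
      omega
    have hnotin : 'T' ∉ d.toList := by
      have h := (PySem.Chars.find_eq_neg_one_iff d.toList ['T']).mp hm1
      intro hmem
      exact h ((List.singleton_infix_iff _ _).mpr hmem)
    have htw : d.toList.takeWhile (· ≠ 'T') = d.toList :=
      takeWhile_eq_self_of_not_mem hnotin
    simp only [get_date_and_time, get_date_and_time_alt, gdtLoop1_spec, gdtLoop2_spec,
      PySem.Str.find_eq, PySem.Str.len_eq, String.toList_ofList, String.toList_append,
      PySem.Str.toList_slice, PySem.Str.toList_replace, PySem.Chars.slice_eq_listSlice]
    rw [show ("T" : String).toList = ['T'] from rfl, hm1, if_pos rfl, htw]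
    rw [PySem.List.slice_to _ (by positivity), PySem.List.slice_from _ (by positivity)]
    rw [show ("+" : String).toList = ['+'] from rfl, show ("" : String).toList = [] from rfl]
    simp [replace_plus]
  · -- 'T' at index j = find
    set f := PySem.Chars.find d.toList ['T'] with hf
    have hne : f ≠ -1 := by omega
    obtain ⟨hpre, hmin⟩ := PySem.Chars.find_spec (s := d.toList) (sub := ['T']) hpos
    obtain ⟨t, ht⟩ := hpre
    have hjlt : f.toNat < d.toList.length := by
      by_contra hge
      rw [List.drop_eq_nil_of_le (by omega)] at ht
      simp at ht
    have hgetj : d.toList[f.toNat]'hjlt = 'T' := by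
      have h0 : d.toList.drop f.toNat = 'T' :: t := by simpa using ht.symm
      rw [List.drop_eq_getElem_cons hjlt] at h0
      exact (List.cons_eq_cons.mp h0).1
    have hlt : ∀ i, (hi : i < f.toNat) → d.toList[i]'(by omega) ≠ 'T' := by
      intro i hi hTi
      apply hmin i hi
      refine ⟨d.toList.drop (i + 1), ?_⟩
      rw [← hTi]
      exact (List.drop_eq_getElem_cons (by omega)).symm
    have htw : d.toList.takeWhile (· ≠ 'T') = d.toList.take f.toNat :=
      takeWhile_eq_take_of_getElem hjlt hgetj hlt
    have hlen : (d.toList.take f.toNat).length = f.toNat := by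
      rw [List.length_take]; omega
    simp only [get_date_and_time, get_date_and_time_alt, gdtLoop1_spec, gdtLoop2_spec,
      PySem.Str.find_eq, String.toList_ofList, String.toList_append,
      PySem.Str.toList_slice, PySem.Str.toList_replace, PySem.Chars.slice_eq_listSlice]
    rw [show ("T" : String).toList = ['T'] from rfl, ← hf, if_neg hne, htw]
    rw [PySem.List.slice_to _ hpos, PySem.List.slice_from _ hpos]
    rw [show ("+" : String).toList = ['+'] from rfl, show ("" : String).toList = [] from rfl]
    simp [replace_plus, hlen]

-- ===== VERDICT (by name: the statement is the Claim_ definition above) =====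
theorem get_date_and_time_spec : Claim_equal_get_date_and_time := by
  intro d _
  exact get_date_and_time_eq d
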